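-- pv_equiv track=rewrite | github.com/Narodk1/Boot2Code | sonalyse_advisor/json_utils.py | get_noise_type_by_hour
-- ===== SOURCE A (Python) =====
-- def get_noise_type_by_hour(extracted_dominant_noise: list) -> dict:
--     """Get noise types grouped by hour.
--
--     Args:
--         extracted_dominant_noise : list : List of dominant noise types extracted from JSON data.
--     Returns:
--         dict : Dictionary with hour as keys and list of noise types as values.
--             Exemple :
--             {"10": ["traffic", "construction", "traffic"],
--             "11": ["nature", "traffic"]}
--     """
--
--     noise_type_by_hour = {}
--     for item in extracted_dominant_noise:
--         timestamp = item.get("timestamp")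
--         hour = timestamp.split(" ")[1].split(":")[0]
--         noise_type = item.get("dominant_noise_type")
--         if hour not in noise_type_by_hour:
--             noise_type_by_hour[hour] = []
--         noise_type_by_hour[hour].append(noise_type)
--     return noise_type_by_hour
-- ===== SOURCE B (Python) =====
-- def get_noise_type_by_hour(extracted_dominant_noise: list) -> dict:
--     """Group noise types by hour: flatten to (hour, noise_type) pairs first,
--     then build the result per distinct hour with comprehensions."""
--     pairs = [
--         (item.get("timestamp").split(" ")[1].split(":")[0],
--          item.get("dominant_noise_type"))
--         for item in extracted_dominant_noise
--     ]
--     hours = []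
--     for h, _ in pairs:
--         if h not in hours:
--             hours.append(h)
--     return {h: [nt for h2, nt in pairs if h2 == h] for h in hours}
-- ===== Notes on version B (the rewrite author's own statement) =====
-- stated objective: alternative
-- what changed: B replaces A's single pass that mutates per-key list values inside a dict with a two-phase decomposition: first flatten to a list of (hour, noise_type) pairs, collect the distinct hours in first-occurrence order, then build the whole dict at once with a per-hour filter comprehension.
-- outside the precondition, e.g. on get_noise_type_by_hour([{'timestamp': 'a 1:2'}]): A returns {'1': [None]}, B returns {'1': [None]}
import Mathlib
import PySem

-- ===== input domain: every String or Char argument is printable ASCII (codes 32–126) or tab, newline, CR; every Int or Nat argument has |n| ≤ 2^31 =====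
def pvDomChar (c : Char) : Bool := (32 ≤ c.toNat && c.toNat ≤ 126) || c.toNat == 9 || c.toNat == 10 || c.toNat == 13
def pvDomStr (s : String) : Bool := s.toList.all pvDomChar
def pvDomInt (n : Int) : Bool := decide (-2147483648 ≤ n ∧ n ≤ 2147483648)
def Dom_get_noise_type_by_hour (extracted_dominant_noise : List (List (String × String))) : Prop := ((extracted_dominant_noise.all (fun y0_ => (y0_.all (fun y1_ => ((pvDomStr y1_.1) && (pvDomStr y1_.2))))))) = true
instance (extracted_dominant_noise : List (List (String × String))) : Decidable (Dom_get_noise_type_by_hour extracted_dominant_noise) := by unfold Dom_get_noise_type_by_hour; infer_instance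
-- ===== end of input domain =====

-- B restates A's dict-mutating pass as: flatten to (hour, noise_type) pairs, collect distinct hours
-- in first-occurrence order, then build the result per hour by a filter comprehension (objective: alternative).

-- hour = timestamp.split(" ")[1].split(":")[0]; the "" default of pyGetD is unreachable under Pre_
-- (the split has ≥ 2 parts there); outside Pre_ Python A raises on this expression.
def pvHour (ts : String) : String :=
  String.ofList (PySem.List.pyGetD
    (PySem.Chars.splitOn (PySem.List.pyGetD (PySem.Chars.splitOn ts.toList [' ']) 1 []) [':']) 0 [])

-- ===== PORT A =====
-- item.get(k) → first-match lookup on the assoc list; the .getD "" default is unreachable under Pre_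
-- ("timestamp" present there; a missing "dominant_noise_type" would put a None in the result, outside Pre_).
def get_noise_type_by_hour (extracted_dominant_noise : List (List (String × String))) : List (String × List String) :=
  (extracted_dominant_noise.foldl
    (fun (d : PySem.Dict String (List String)) item =>
      let timestamp := (item.lookup "timestamp").getD ""
      let hour := pvHour timestamp
      let noise_type := (item.lookup "dominant_noise_type").getD ""
      let d := if d.contains hour then d else d.insert hour []
      d.modify hour [] (fun l => l ++ [noise_type]))
    PySem.Dict.empty).items

-- ===== PORT B =====
-- Source B's local variables `pairs` and `hours` become the helper defs pvPairsB / pvHoursB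
def pvPairB (item : List (String × String)) : String × String :=
  (pvHour ((item.lookup "timestamp").getD ""), (item.lookup "dominant_noise_type").getD "")

def pvPairsB (extracted_dominant_noise : List (List (String × String))) : List (String × String) :=
  extracted_dominant_noise.map pvPairB

def pvHoursB (pairs : List (String × String)) : List String :=
  pairs.foldl (fun (s : List String) p => if p.1 ∈ s then s else s ++ [p.1]) []

def get_noise_type_by_hour_alt (extracted_dominant_noise : List (List (String × String))) : List (String × List String) :=
  (pvHoursB (pvPairsB extracted_dominant_noise)).map
    (fun h => (h, ((pvPairsB extracted_dominant_noise).filter (fun p => p.1 == h)).map (·.2)))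

-- ===== PRECONDITION & SPEC =====
-- Pre_ excludes items without a "timestamp" key or whose timestamp has no space (Python A raises
-- AttributeError/IndexError there), and items without a "dominant_noise_type" key, on which A returns a
-- dict containing None where a str is expected (not a value of the declared type List[str]).
def pvItemOk (item : List (String × String)) : Bool :=
  (match item.lookup "timestamp" with
   | some ts => decide (2 ≤ (PySem.Chars.splitOn ts.toList [' ']).length)
   | none => false)
  && (item.lookup "dominant_noise_type").isSome

-- Spaceless "timestamp" values — "2024-01-01", "10:30:00", "hh:mm:ss", "yyyy-mm-dd",
-- "2024-01-01T10:30", "12h34" — make A's split(" ")[1] raise IndexError, hence the length check above.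
def Pre_get_noise_type_by_hour (extracted_dominant_noise : List (List (String × String))) : Prop :=
  extracted_dominant_noise.all pvItemOk = true
instance (extracted_dominant_noise : List (List (String × String))) : Decidable (Pre_get_noise_type_by_hour extracted_dominant_noise) := by unfold Pre_get_noise_type_by_hour; infer_instance

def pvWitness_get_noise_type_by_hour : (List (List (String × String))) :=
  [[("timestamp", "2024-01-01 10:00:00"), ("dominant_noise_type", "traffic")],
   [("timestamp", "2024-01-01 11:00:00"), ("dominant_noise_type", "nature")],
   [("timestamp", "2024-01-01 10:30:00"), ("dominant_noise_type", "traffic")]]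

def Spec_get_noise_type_by_hour (extracted_dominant_noise : List (List (String × String))) (out : List (String × List String)) : Prop := out = get_noise_type_by_hour_alt extracted_dominant_noise
instance (extracted_dominant_noise : List (List (String × String))) (out : List (String × List String)) : Decidable (Spec_get_noise_type_by_hour extracted_dominant_noise out) := by unfold Spec_get_noise_type_by_hour; infer_instance

-- ===== CLAIM (what is proved, stated in full; the proofs are below) =====
def Claim_equal_get_noise_type_by_hour : Prop := ∀ (extracted_dominant_noise : List (List (String × String))), Dom_get_noise_type_by_hour extracted_dominant_noise → Pre_get_noise_type_by_hour extracted_dominant_noise → Spec_get_noise_type_by_hour extracted_dominant_noise (get_noise_type_by_hour extracted_dominant_noise)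

-- ===== LEMMAS AND PROOFS =====

-- A's "if hour not in d: d[hour] = []" followed by append is one modify with default []
theorem step_eq (d : PySem.Dict String (List String)) (h nt : String) :
    (if d.contains h then d else d.insert h []).modify h [] (fun l => l ++ [nt])
      = d.modify h [] (fun l => l ++ [nt]) := by
  have hm : ∀ (d' : PySem.Dict String (List String)),
      d'.modify h [] (fun l => l ++ [nt]) = d'.insert h (d'.getD h [] ++ [nt]) := fun _ => rfl
  by_cases hc : d.contains h = true
  · rw [if_pos hc]
  · rw [if_neg hc]
    simp only [hm]
    rw [PySem.Dict.getD_insert_self, PySem.Dict.insert_insert_self,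
      PySem.Dict.getD_of_not_contains d [] (by simpa using hc)]

theorem A_eq (xs : List (List (String × String))) :
    get_noise_type_by_hour xs
      = ((xs.map pvPairB).foldl
          (fun (d : PySem.Dict String (List String)) (p : String × String) => d.modify p.1 [] (fun l => l ++ [p.2]))
          PySem.Dict.empty).items := by
  unfold get_noise_type_by_hour
  rw [List.foldl_map]
  congr 1
  apply List.foldl_ext
  intro d item _
  exact step_eq d (pvPairB item).1 (pvPairB item).2

theorem B_hours' (pairs : List (String × String)) :
    pvHoursB pairs = PySem.Set.ofList (pairs.map (·.1)) := by
  unfold pvHoursB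
  have : (fun (s : List String) (p : String × String) => if p.1 ∈ s then s else s ++ [p.1])
      = fun (s : PySem.Set String) p => s.add p.1 := by
    funext s p; rw [PySem.Set.add_eq_ite]
  rw [this, ← PySem.Set.update_map_eq_foldl_add, PySem.Set.update_nil_left]

-- ===== VERDICT (by name: the statement is the Claim_ definition above) =====
theorem get_noise_type_by_hour_spec : Claim_equal_get_noise_type_by_hour := by
  intro xs _ _
  unfold Spec_get_noise_type_by_hour get_noise_type_by_hour_alt pvPairsB
  rw [A_eq, B_hours']
  set pairs := xs.map pvPairB with hp
  set D := pairs.foldl (fun (d : PySem.Dict String (List String)) (p : String × String) => d.modify p.1 [] (fun l => l ++ [p.2])) PySem.Dict.empty with hD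
  have hkeys : D.keys = PySem.Set.ofList (pairs.map (·.1)) := by
    rw [hD, PySem.Dict.keys_foldl_modify_key pairs Prod.fst [] (fun _ p => fun l => l ++ [p.2]),
      PySem.Dict.keys_empty, PySem.Set.update_nil_left]
  have hnd : D.keys.Nodup := by
    rw [hkeys]; exact PySem.Set.nodup_ofList _
  rw [PySem.Dict.items_eq_map_keys D hnd [], hkeys]
  apply List.map_congr_left
  intro h _
  have hg := PySem.Dict.getD_foldl_modify_append pairs PySem.Dict.empty h
  rw [PySem.Dict.getD_empty] at hg
  rw [hD] at *
  rw [hg]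
  simp
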